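-- pv_equiv track=rewrite | github.com/zshuang7/Fin-CIO | tools/eodhd_engine.py | _eodhd_ticker
-- ===== SOURCE A (Python) =====
-- _EXCHANGE_MAP = {
--     ".T":   ".TSE",    # Tokyo
--     ".L":   ".LSE",    # London
--     ".HK":  ".HK",     # Hong Kong (same)
--     ".PA":  ".PA",     # Paris
--     ".DE":  ".XETRA",  # Frankfurt / XETRA
--     ".AX":  ".AU",     # Australia
--     ".TO":  ".TO",     # Toronto
--     ".SS":  ".SHG",    # Shanghai
--     ".SZ":  ".SHE",    # Shenzhen
-- }
--
-- def _eodhd_ticker(ticker: str) -> str: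
--     """
--     Convert Yahoo Finance ticker format to EODHD format.
--     Plain US tickers (TSLA, NVDA) get the '.US' suffix required by
--     the fundamentals endpoint.
--     """
--     t = ticker.upper().strip()
--     # Already has an exchange suffix
--     for yf_sfx, eodhd_sfx in _EXCHANGE_MAP.items():
--         if t.endswith(yf_sfx):
--             return t[: -len(yf_sfx)] + eodhd_sfx
--     # Plain US ticker (no dot)
--     if "." not in t:
--         return f"{t}.US"
--     return t
-- ===== SOURCE B (Python) =====
-- _EXCHANGE_MAP = {
--     ".T":   ".TSE",    # Tokyo
--     ".L":   ".LSE",    # London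
--     ".HK":  ".HK",     # Hong Kong (same)
--     ".PA":  ".PA",     # Paris
--     ".DE":  ".XETRA",  # Frankfurt / XETRA
--     ".AX":  ".AU",     # Australia
--     ".TO":  ".TO",     # Toronto
--     ".SS":  ".SHG",    # Shanghai
--     ".SZ":  ".SHE",    # Shenzhen
-- }
--
-- def _eodhd_ticker(ticker: str) -> str:
--     """Split off the last-dot suffix once and map it with a single dict lookup."""
--     t = ticker.upper().strip()
--     head, dot, tail = t.rpartition(".")
--     if not dot:
--         return t + ".US"
--     repl = _EXCHANGE_MAP.get(dot + tail)
--     return head + repl if repl is not None else t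
-- ===== Notes on version B (the rewrite author's own statement) =====
-- stated objective: idiomatic
-- what changed: Replaces the ordered endswith-scan over all nine map entries by a single str.rpartition at the last dot followed by one dict lookup of the computed suffix (valid because every map key is a dot plus a dot-free segment).
import Mathlib
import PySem

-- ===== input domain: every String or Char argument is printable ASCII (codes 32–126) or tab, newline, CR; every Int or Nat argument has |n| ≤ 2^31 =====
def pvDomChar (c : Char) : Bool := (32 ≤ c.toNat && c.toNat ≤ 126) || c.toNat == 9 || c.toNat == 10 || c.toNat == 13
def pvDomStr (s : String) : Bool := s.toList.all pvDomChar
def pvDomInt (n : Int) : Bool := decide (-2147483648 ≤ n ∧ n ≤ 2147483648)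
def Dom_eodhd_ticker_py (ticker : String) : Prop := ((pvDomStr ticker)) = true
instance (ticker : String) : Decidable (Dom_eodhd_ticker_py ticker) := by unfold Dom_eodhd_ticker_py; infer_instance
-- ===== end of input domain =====

-- B replaces A's ordered endswith-scan over the nine map entries by one rpartition at the
-- last dot plus a single dict lookup of the computed suffix (objective: idiomatic).

-- ===== PORT A =====
-- the module constant _EXCHANGE_MAP, as a List-Char association list (insertion order)
def pvExchangeMap : List (List Char × List Char) :=
  [(".T".toList, ".TSE".toList), (".L".toList, ".LSE".toList), (".HK".toList, ".HK".toList),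
   (".PA".toList, ".PA".toList), (".DE".toList, ".XETRA".toList), (".AX".toList, ".AU".toList),
   (".TO".toList, ".TO".toList), (".SS".toList, ".SHG".toList), (".SZ".toList, ".SHE".toList)]

-- A's 'for yf_sfx, eodhd_sfx in _EXCHANGE_MAP.items(): if t.endswith(yf_sfx): return t[:-len(yf_sfx)] + eodhd_sfx'
def pvALoop (t : List Char) : List (List Char × List Char) → Option (List Char)
  | [] => none
  | (k, e) :: rest =>
      if PySem.Chars.endswith t k then
        some (PySem.Chars.slice t none (some (-(k.length : Int))) ++ e)
      else pvALoop t rest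

def eodhd_ticker_py (ticker : String) : String :=
  let t := PySem.Chars.strip (PySem.Chars.upper ticker.toList)
  match pvALoop t pvExchangeMap with
  | some r => String.ofList r
  | none =>
      if PySem.Chars.isIn ['.'] t then String.ofList t   -- '"." not in t' branch order kept
      else String.ofList (t ++ ".US".toList)

-- ===== PORT B =====
-- hand port of t.rpartition("."): some (head, tail) with t = head ++ '.' :: tail and no '.'
-- in tail (the split at the LAST dot); none when t has no dot.  Exact for this 1-char separator.
def pvLastSplit : List Char → Option (List Char × List Char)
  | [] => none
  | c :: cs =>
      match pvLastSplit cs with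
      | some (h, tl) => some (c :: h, tl)
      | none => if c = '.' then some ([], cs) else none

def eodhd_ticker_py_alt (ticker : String) : String :=
  let t := PySem.Chars.strip (PySem.Chars.upper ticker.toList)
  match pvLastSplit t with
  | none => String.ofList (t ++ ".US".toList)
  | some (head, tail) =>
      match PySem.Dict.get? (PySem.Dict.mk pvExchangeMap) ('.' :: tail) with
      | some repl => String.ofList (head ++ repl)
      | none => String.ofList t

-- ===== PRECONDITION & SPEC =====
def Spec_eodhd_ticker_py (ticker : String) (out : String) : Prop := out = eodhd_ticker_py_alt ticker
instance (ticker : String) (out : String) : Decidable (Spec_eodhd_ticker_py ticker out) := by unfold Spec_eodhd_ticker_py; infer_instance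

-- ===== CLAIM (what is proved, stated in full; the proofs are below) =====
def Claim_equal_eodhd_ticker_py : Prop := ∀ (ticker : String), Dom_eodhd_ticker_py ticker → Spec_eodhd_ticker_py ticker (eodhd_ticker_py ticker)

-- ===== LEMMAS AND PROOFS =====

-- pvLastSplit = none means the list has no dot
theorem pvLastSplit_none {l : List Char} (h : pvLastSplit l = none) : '.' ∉ l := by
  induction l with
  | nil => simp
  | cons c cs ih =>
    simp only [pvLastSplit] at h
    rcases hcs : pvLastSplit cs with _ | ⟨hd, tl⟩ <;> rw [hcs] at h
    · split_ifs at h with hc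
      all_goals try simp at h
      intro hmem
      rcases List.mem_cons.1 hmem with h1 | h2
      · exact hc h1.symm
      · exact ih hcs h2
    · simp at h

-- pvLastSplit splits at the LAST dot: the tail is dot-free
theorem pvLastSplit_some {l h t : List Char} (hs : pvLastSplit l = some (h, t)) :
    l = h ++ '.' :: t ∧ '.' ∉ t := by
  induction l generalizing h t with
  | nil => simp [pvLastSplit] at hs
  | cons c cs ih =>
    simp only [pvLastSplit] at hs
    rcases hcs : pvLastSplit cs with _ | ⟨hd, tl⟩ <;> rw [hcs] at hs
    · split_ifs at hs with hc
      all_goals try simp at hs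
      obtain ⟨rfl, rfl⟩ := hs
      exact ⟨by simp [hc], pvLastSplit_none hcs⟩
    · obtain ⟨rfl, rfl⟩ := by simpa using hs
      obtain ⟨h1, h2⟩ := ih hcs
      exact ⟨by simp [h1], h2⟩

-- uniqueness of the last-dot decomposition
theorem pvSplit_unique {h₁ t₁ h₂ t₂ : List Char} (he : h₁ ++ '.' :: t₁ = h₂ ++ '.' :: t₂)
    (n₁ : '.' ∉ t₁) (n₂ : '.' ∉ t₂) : h₁ = h₂ ∧ t₁ = t₂ := by
  induction h₁ generalizing h₂ with
  | nil =>
    cases h₂ with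
    | nil => simpa using he
    | cons d h₂' =>
      simp at he
      obtain ⟨rfl, he⟩ := he
      exact absurd (by rw [he]; simp) n₁
  | cons c h₁' ih =>
    cases h₂ with
    | nil =>
      simp at he
      obtain ⟨rfl, he⟩ := he
      exact absurd (by rw [← he]; simp) n₂
    | cons d h₂' =>
      simp at he
      obtain ⟨rfl, he⟩ := he
      obtain ⟨e1, e2⟩ := ih he
      exact ⟨by rw [e1], e2⟩

-- a dot-headed, otherwise dot-free key is a suffix of h ++ '.'::t (t dot-free) iff it IS '.'::t
theorem pvSuffix_iff {k' h t : List Char} (hk : '.' ∉ k') (ht : '.' ∉ t) :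
    ('.' :: k') <:+ (h ++ '.' :: t) ↔ k' = t := by
  constructor
  · rintro ⟨p, hp⟩
    exact (pvSplit_unique hp.symm ht hk).2.symm
  · rintro rfl
    exact ⟨h, rfl⟩

-- if t has no dot at all, no entry of the scan can match
theorem pvALoop_of_no_dot {l : List Char} (hl : '.' ∉ l)
    {m : List (List Char × List Char)} (hm : ∀ p ∈ m, '.' ∈ p.1) :
    pvALoop l m = none := by
  induction m with
  | nil => rfl
  | cons p rest ih =>
    obtain ⟨k, e⟩ := p
    simp only [pvALoop]
    have hne : PySem.Chars.endswith l k = false := by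
      rw [Bool.eq_false_iff]
      intro hE
      exact hl (((PySem.Chars.endswith_iff l k).1 hE).subset (hm (k, e) (by simp)))
    rw [hne]
    simpa using ih (fun p hp => hm p (by simp [hp]))

-- A's endswith-scan over dot-plus-dot-free keys IS the lookup of the last-dot suffix
theorem pvALoop_eq_lookup {h t : List Char} (ht : '.' ∉ t)
    (m : List (List Char × List Char))
    (hm : ∀ p ∈ m, ∃ k', p.1 = '.' :: k' ∧ '.' ∉ k') :
    pvALoop (h ++ '.' :: t) m =
      Option.map (fun e => h ++ e) (PySem.Dict.get? (PySem.Dict.mk m) ('.' :: t)) := by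
  induction m with
  | nil => simp [pvALoop, PySem.Dict.get?]
  | cons p rest ih =>
    obtain ⟨k, e⟩ := p
    obtain ⟨k', hk, hk'⟩ := hm (k, e) (by simp)
    simp only at hk
    subst hk
    by_cases heq : k' = t
    · subst heq
      have hsuf : PySem.Chars.endswith (h ++ '.' :: k') ('.' :: k') = true :=
        (PySem.Chars.endswith_iff _ _).2 ⟨h, rfl⟩
      simp only [pvALoop, hsuf, if_true]
      have hslice : PySem.Chars.slice (h ++ '.' :: k') none (some (-(('.' :: k').length : Int)))
          = h := by
        rw [PySem.Chars.slice_eq_listSlice]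
        have hc : (('.' :: k').length : Int) = ((k'.length + 1 : Nat) : Int) := by simp
        rw [hc, PySem.List.slice_to_neg_natCast _ _ (by omega)]
        have hlen : (h ++ '.' :: k').length - (k'.length + 1) = h.length := by simp
        rw [hlen, List.take_left]
      rw [hslice, PySem.Dict.get?_mk_cons]
      simp
    · have hne : PySem.Chars.endswith (h ++ '.' :: t) ('.' :: k') = false := by
        rw [Bool.eq_false_iff]
        intro hE
        exact heq ((pvSuffix_iff hk' ht).1 ((PySem.Chars.endswith_iff _ _).1 hE))
      simp only [pvALoop, hne]
      rw [PySem.Dict.get?_mk_cons]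
      have hbne : (('.' :: k' : List Char) == ('.' :: t)) = false := by
        rw [beq_eq_false_iff_ne]
        intro hcon
        exact heq (by injection hcon)
      rw [hbne]
      simpa using ih (fun p hp => hm p (by simp [hp]))

theorem pvMap_keys_dot : ∀ p ∈ pvExchangeMap, '.' ∈ p.1 := by decide

theorem pvMap_keys_shape : ∀ p ∈ pvExchangeMap, ∃ k', p.1 = '.' :: k' ∧ '.' ∉ k' := by
  intro p hp
  fin_cases hp <;> exact ⟨_, rfl, by decide⟩

-- the two bodies agree for every stripped/uppercased character list
theorem pvCore (l : List Char) :
    (match pvALoop l pvExchangeMap with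
     | some r => String.ofList r
     | none =>
         if PySem.Chars.isIn ['.'] l then String.ofList l
         else String.ofList (l ++ ".US".toList)) =
    (match pvLastSplit l with
     | none => String.ofList (l ++ ".US".toList)
     | some (head, tail) =>
         match PySem.Dict.get? (PySem.Dict.mk pvExchangeMap) ('.' :: tail) with
         | some repl => String.ofList (head ++ repl)
         | none => String.ofList l) := by
  rcases hsplit : pvLastSplit l with _ | ⟨head, tail⟩
  · have hnd := pvLastSplit_none hsplit
    have hni : PySem.Chars.isIn ['.'] l = false :=
      (PySem.Chars.isIn_eq_false_iff _ _).2 (fun hinf =>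
        hnd ((List.singleton_infix_iff '.' l).mp hinf))
    rw [pvALoop_of_no_dot hnd pvMap_keys_dot, hni]
    rfl
  · obtain ⟨hdec, ht⟩ := pvLastSplit_some hsplit
    rw [hdec, pvALoop_eq_lookup ht pvExchangeMap pvMap_keys_shape]
    rcases hget : PySem.Dict.get? (PySem.Dict.mk pvExchangeMap) ('.' :: tail) with _ | e
    · simp only [Option.map_none]
      have hii : PySem.Chars.isIn ['.'] (head ++ '.' :: tail) = true :=
        (PySem.Chars.isIn_iff_infix _ _).2
          ((List.singleton_infix_iff '.' _).mpr (by simp))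
      rw [hii, hget]
      rfl
    · simp only [Option.map_some]
      rw [hget]

-- ===== VERDICT (by name: the statement is the Claim_ definition above) =====
theorem eodhd_ticker_py_spec : Claim_equal_eodhd_ticker_py := by
  intro ticker _
  exact pvCore (PySem.Chars.strip (PySem.Chars.upper ticker.toList))
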